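-- pv_equiv track=rewrite | github.com/thustlerwizzle/zodia-regulatory-toolkit | gap_analysis.py | categorize_gaps
-- ===== SOURCE A (Python) =====
-- from typing import Dict, List, Optional
--
-- def categorize_gaps(gaps: List[Dict]) -> Dict[str, List[Dict]]:
--     """Categorize gaps by priority level"""
--     categorized = {
--         "critical": [],
--         "high": [],
--         "medium": [],
--         "low": []
--     }
--
--     for gap in gaps:
--         priority = gap.get("priority", "medium").lower()
--         if priority in categorized:
--             categorized[priority].append(gap)
--         else:
--             categorized["medium"].append(gap)
--
--     return categorized
-- ===== SOURCE B (Python) =====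
-- def categorize_gaps(gaps):
--     """Categorize gaps by priority level (four filtering passes, one per bucket)."""
--     def norm(gap):
--         p = gap.get("priority", "medium").lower()
--         return p if p in ("critical", "high", "medium", "low") else "medium"
--     return {k: [g for g in gaps if norm(g) == k]
--             for k in ("critical", "high", "medium", "low")}
-- ===== Notes on version B (the rewrite author's own statement) =====
-- stated objective: alternative
-- what changed: A makes one pass appending each gap into a mutable four-bucket dict; B defines a priority-normalization helper and builds the dict by comprehension with one filtering pass per fixed bucket.
import Mathlib
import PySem

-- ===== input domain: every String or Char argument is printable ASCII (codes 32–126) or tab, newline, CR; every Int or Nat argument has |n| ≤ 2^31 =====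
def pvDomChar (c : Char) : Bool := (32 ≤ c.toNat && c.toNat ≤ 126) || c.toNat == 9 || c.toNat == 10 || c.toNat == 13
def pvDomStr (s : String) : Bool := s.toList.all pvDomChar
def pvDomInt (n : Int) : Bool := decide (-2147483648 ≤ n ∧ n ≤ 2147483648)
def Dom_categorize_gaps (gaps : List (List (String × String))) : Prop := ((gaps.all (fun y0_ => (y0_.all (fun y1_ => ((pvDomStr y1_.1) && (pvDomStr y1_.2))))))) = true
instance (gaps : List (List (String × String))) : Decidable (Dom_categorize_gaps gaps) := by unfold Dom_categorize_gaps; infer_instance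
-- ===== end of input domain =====

-- B differs from A by decomposition only (normalize + per-bucket filters); return values proved equal.

-- ===== PORT A =====
-- A: single pass appending each gap into a mutable 4-key dict
def cgStepA (d : PySem.Dict String (List (List (String × String)))) (gap : List (String × String)) :
    PySem.Dict String (List (List (String × String))) :=
  let priority := PySem.Str.lower ((PySem.Dict.mk gap).getD "priority" "medium")
  if d.contains priority then d.modify priority [] (· ++ [gap])
  else d.modify "medium" [] (· ++ [gap])

def categorize_gaps (gaps : List (List (String × String))) : List (String × List (List (String × String))) :=
  (gaps.foldl cgStepA
    (PySem.Dict.mk [("critical", []), ("high", []), ("medium", []), ("low", [])])).items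

-- ===== PORT B =====
-- B: normalization helper, then one filtering pass per fixed key
def cgNorm (gap : List (String × String)) : String :=
  let p := PySem.Str.lower ((PySem.Dict.mk gap).getD "priority" "medium")
  if p ∈ ["critical", "high", "medium", "low"] then p else "medium"

def categorize_gaps_alt (gaps : List (List (String × String))) : List (String × List (List (String × String))) :=
  ["critical", "high", "medium", "low"].map
    (fun k => (k, gaps.filter (fun g => cgNorm g == k)))

-- ===== PRECONDITION & SPEC =====
def Spec_categorize_gaps (gaps : List (List (String × String))) (out : List (String × List (List (String × String)))) : Prop := out = categorize_gaps_alt gaps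
instance (gaps : List (List (String × String))) (out : List (String × List (List (String × String)))) : Decidable (Spec_categorize_gaps gaps out) := by unfold Spec_categorize_gaps; infer_instance

-- ===== CLAIM (what is proved, stated in full; the proofs are below) =====
def Claim_equal_categorize_gaps : Prop := ∀ (gaps : List (List (String × String))), Dom_categorize_gaps gaps → Spec_categorize_gaps gaps (categorize_gaps gaps)

-- ===== LEMMAS AND PROOFS =====

-- one step of A's fold on a four-bucket literal dict, in terms of B's normalization
theorem cgStepA_eq (a b c d : List (List (String × String))) (g : List (String × String)) :
    cgStepA (PySem.Dict.mk [("critical", a), ("high", b), ("medium", c), ("low", d)]) g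
    = PySem.Dict.mk [("critical", if cgNorm g = "critical" then a ++ [g] else a),
                     ("high",     if cgNorm g = "high"     then b ++ [g] else b),
                     ("medium",   if cgNorm g = "medium"   then c ++ [g] else c),
                     ("low",      if cgNorm g = "low"      then d ++ [g] else d)] := by
  unfold cgStepA cgNorm
  generalize PySem.Str.lower ((PySem.Dict.mk g).getD "priority" "medium") = p
  by_cases h1 : p = "critical"
  · subst h1; simp [PySem.Dict.contains, PySem.Dict.modify, PySem.Dict.insert,
      PySem.Dict.getD, PySem.Dict.get?]
  · by_cases h2 : p = "high"
    · subst h2; simp [PySem.Dict.contains, PySem.Dict.modify, PySem.Dict.insert,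
        PySem.Dict.getD, PySem.Dict.get?]
    · by_cases h3 : p = "medium"
      · subst h3; simp [PySem.Dict.contains, PySem.Dict.modify, PySem.Dict.insert,
          PySem.Dict.getD, PySem.Dict.get?]
      · by_cases h4 : p = "low"
        · subst h4; simp [PySem.Dict.contains, PySem.Dict.modify, PySem.Dict.insert,
            PySem.Dict.getD, PySem.Dict.get?]
        · simp [PySem.Dict.contains, PySem.Dict.modify, PySem.Dict.insert,
            PySem.Dict.getD, PySem.Dict.get?, h1, h2, h3, h4, Ne.symm h1, Ne.symm h2, Ne.symm h3, Ne.symm h4]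

-- loop invariant: folding A's step over any four-bucket accumulator appends B's filters
theorem cg_foldl_inv (gaps : List (List (String × String)))
    (a b c d : List (List (String × String))) :
    (gaps.foldl cgStepA
      (PySem.Dict.mk [("critical", a), ("high", b), ("medium", c), ("low", d)])).items
    = [("critical", a ++ gaps.filter (fun g => cgNorm g == "critical")),
       ("high",     b ++ gaps.filter (fun g => cgNorm g == "high")),
       ("medium",   c ++ gaps.filter (fun g => cgNorm g == "medium")),
       ("low",      d ++ gaps.filter (fun g => cgNorm g == "low"))] := by
  induction gaps generalizing a b c d with
  | nil => simp
  | cons g rest ih =>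
    rw [List.foldl_cons, cgStepA_eq, ih]
    simp only [List.filter_cons]
    by_cases h1 : cgNorm g = "critical" <;> by_cases h2 : cgNorm g = "high" <;>
      by_cases h3 : cgNorm g = "medium" <;> by_cases h4 : cgNorm g = "low" <;>
      simp_all

-- ===== VERDICT (by name: the statement is the Claim_ definition above) =====
theorem categorize_gaps_spec : Claim_equal_categorize_gaps := by
  intro gaps _
  unfold Spec_categorize_gaps categorize_gaps categorize_gaps_alt
  simpa using cg_foldl_inv gaps [] [] [] []
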